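-- pv_equiv track=rewrite | github.com/AndrevdM02/Web-Development | Web Scraper/web_scraper.py | from_and_to_date
-- ===== SOURCE A (Python) =====
-- def from_and_to_date(items, fromdate, todate):
--     data = []
--     if fromdate or todate:
--         for item in items:
--             date = item['creation_date']
--             if fromdate and todate:
--                 if int(fromdate) <= int(date) < int(todate):
--                     data.append(item)
--             elif fromdate:
--                 if int(date) >= int(fromdate):
--                     data.append(item)
--             else:
--                 if int(date) < int(todate):
--                     data.append(item)
--     else:
--         return items
--
--     return data
-- ===== SOURCE B (Python) =====
-- def from_and_to_date(items, fromdate, todate):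
--     # staged pipeline: apply each bound as its own independent filter pass
--     if not (fromdate or todate):
--         return items
--     result = items
--     if fromdate:
--         result = [item for item in result
--                   if int(item['creation_date']) >= int(fromdate)]
--     if todate:
--         result = [item for item in result
--                   if int(item['creation_date']) < int(todate)]
--     return result
-- ===== Notes on version B (the rewrite author's own statement) =====
-- stated objective: simpler
-- what changed: Replaces A's single accumulator loop with a per-item three-way branch on which bounds exist by a staged pipeline of two independent filter passes, one per present bound, each applying only its own one-sided comparison.
import Mathlib
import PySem

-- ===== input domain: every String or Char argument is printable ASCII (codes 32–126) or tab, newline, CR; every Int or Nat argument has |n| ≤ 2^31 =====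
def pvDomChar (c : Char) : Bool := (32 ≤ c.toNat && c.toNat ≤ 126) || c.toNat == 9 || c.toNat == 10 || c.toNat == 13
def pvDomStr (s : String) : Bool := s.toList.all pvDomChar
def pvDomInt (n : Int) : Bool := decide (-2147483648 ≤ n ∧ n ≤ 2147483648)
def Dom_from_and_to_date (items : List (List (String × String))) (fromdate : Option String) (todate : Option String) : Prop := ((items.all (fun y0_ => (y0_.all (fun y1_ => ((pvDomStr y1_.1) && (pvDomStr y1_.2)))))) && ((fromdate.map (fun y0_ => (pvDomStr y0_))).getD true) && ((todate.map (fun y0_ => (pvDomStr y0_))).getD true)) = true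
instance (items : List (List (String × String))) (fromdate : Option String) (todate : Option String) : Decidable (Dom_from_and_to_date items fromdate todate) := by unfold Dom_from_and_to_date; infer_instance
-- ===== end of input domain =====

-- B replaces A's accumulator loop with its per-item three-way branch on which bounds exist
-- by a staged pipeline: one independent filter pass per present bound.

-- shared primitives: Python truthiness of an Optional[str]; int(s) (default 0, Pre_ excludes
-- ValueError); item['creation_date'] through the dict built from the item's pairs
def pvTruthy (o : Option String) : Bool := o.getD "" != ""
def pvInt (s : String) : Int := (PySem.Int.ofStr? s).getD 0
def pvDate (item : List (String × String)) : Int :=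
  pvInt ((PySem.Dict.ofList item).getD "creation_date" "")

-- ===== PORT A =====
def from_and_to_date (items : List (List (String × String))) (fromdate : Option String) (todate : Option String) : List (List (String × String)) :=
  if pvTruthy fromdate || pvTruthy todate then
    items.foldl (fun data item =>
      let date := pvDate item
      if pvTruthy fromdate && pvTruthy todate then
        if pvInt (fromdate.getD "") ≤ date ∧ date < pvInt (todate.getD "") then data ++ [item] else data
      else if pvTruthy fromdate then
        if date ≥ pvInt (fromdate.getD "") then data ++ [item] else data
      else
        if date < pvInt (todate.getD "") then data ++ [item] else data) []
  else items

-- ===== PORT B =====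
def from_and_to_date_alt (items : List (List (String × String))) (fromdate : Option String) (todate : Option String) : List (List (String × String)) :=
  if !(pvTruthy fromdate || pvTruthy todate) then items
  else
    let r1 := if pvTruthy fromdate then
        items.filter (fun item => decide (pvDate item ≥ pvInt (fromdate.getD ""))) else items
    if pvTruthy todate then
      r1.filter (fun item => decide (pvDate item < pvInt (todate.getD ""))) else r1

-- ===== PRECONDITION & SPEC =====
-- Pre_ holds on EXACTLY the inputs where the Python A returns (B returns the same value on
-- all of them): it excludes only the ValueError/KeyError inputs — a reached creation_date
-- missing or unparseable, or a truthy bound that is unparseable AND actually parsed by A's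
-- lazy evaluation (a bound is never parsed when items is empty, and int(todate) is skipped
-- by the chained comparison when no item passes the lower bound).
def Pre_from_and_to_date (items : List (List (String × String))) (fromdate : Option String) (todate : Option String) : Prop :=
  ((if pvTruthy fromdate || pvTruthy todate then
      if items.isEmpty then true
      else
        items.all (fun item => (((PySem.Dict.ofList item).get? "creation_date").bind PySem.Int.ofStr?).isSome)
        && (!pvTruthy fromdate || (PySem.Int.ofStr? (fromdate.getD "")).isSome)
        && (!pvTruthy todate ||
             ((PySem.Int.ofStr? (todate.getD "")).isSome
              || (pvTruthy fromdate
                  && items.all (fun item => decide (pvDate item < pvInt (fromdate.getD ""))))))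
    else true) = true)
instance (items : List (List (String × String))) (fromdate : Option String) (todate : Option String) : Decidable (Pre_from_and_to_date items fromdate todate) := by unfold Pre_from_and_to_date; infer_instance

def pvWitness_from_and_to_date : (List (List (String × String))) × Option String × Option String :=
  ([[("creation_date", "5")], [("creation_date", "12")]], some "4", some "10")

def Spec_from_and_to_date (items : List (List (String × String))) (fromdate : Option String) (todate : Option String) (out : List (List (String × String))) : Prop := out = from_and_to_date_alt items fromdate todate
instance (items : List (List (String × String))) (fromdate : Option String) (todate : Option String) (out : List (List (String × String))) : Decidable (Spec_from_and_to_date items fromdate todate out) := by unfold Spec_from_and_to_date; infer_instance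

-- ===== CLAIM =====
def Claim_equal_from_and_to_date : Prop := ∀ (items : List (List (String × String))) (fromdate : Option String) (todate : Option String), Dom_from_and_to_date items fromdate todate → Pre_from_and_to_date items fromdate todate → Spec_from_and_to_date items fromdate todate (from_and_to_date items fromdate todate)

-- ===== LEMMAS AND PROOFS =====

theorem pvWitness_ok : Dom_from_and_to_date pvWitness_from_and_to_date.1 pvWitness_from_and_to_date.2.1 pvWitness_from_and_to_date.2.2 ∧ Pre_from_and_to_date pvWitness_from_and_to_date.1 pvWitness_from_and_to_date.2.1 pvWitness_from_and_to_date.2.2 := by decide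

-- ===== VERDICT =====
theorem from_and_to_date_spec : Claim_equal_from_and_to_date := by
  intro items fromdate todate _ _
  unfold Spec_from_and_to_date from_and_to_date from_and_to_date_alt
  cases hf : pvTruthy fromdate <;> cases ht : pvTruthy todate <;>
    simp only [hf, ht, Bool.and_self, Bool.and_false, Bool.false_and,
      Bool.or_self, Bool.or_false, Bool.false_or, Bool.not_true, Bool.not_false,
      if_true, if_false, Bool.false_eq_true]
  · rw [PySem.List.foldl_append_ite_eq_filter]; simp
  · rw [PySem.List.foldl_append_ite_eq_filter]; simp
  · rw [PySem.List.foldl_append_ite_eq_filter]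
    simp only [List.filter_filter, ge_iff_le]
    exact List.filter_congr (fun x _ => by simp [Bool.and_comm])
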